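-- pv_equiv track=rewrite | github.com/KMORaza/leetcode-solutions | LeetCode Solutions/0371.py | getSum
-- ===== SOURCE A (Python) =====
-- def getSum(a: int, b: int) -> int:
--     MAX = 0xFFFFFFFF
--     a, b = a & MAX, b & MAX
--     while b != 0:
--         carry = (a & b) << 1
--         a = (a ^ b) & MAX
--         b = carry & MAX
--     if a > 0x7FFFFFFF:
--         a -= (1 << 32)
--     return a
-- ===== SOURCE B (Python) =====
-- def getSum(a: int, b: int) -> int:
--     MAX = 0xFFFFFFFF
--     s = ((a & MAX) + (b & MAX)) & MAX
--     return s - (1 << 32) if s > 0x7FFFFFFF else s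
-- ===== Notes on version B (the rewrite author's own statement) =====
-- stated objective: simpler
-- what changed: Replaces the iterative bitwise carry-propagation while-loop with a single closed-form arithmetic expression: mask both operands, add once, mask the sum back to 32 bits, then apply the same signed adjustment.
import Mathlib
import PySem

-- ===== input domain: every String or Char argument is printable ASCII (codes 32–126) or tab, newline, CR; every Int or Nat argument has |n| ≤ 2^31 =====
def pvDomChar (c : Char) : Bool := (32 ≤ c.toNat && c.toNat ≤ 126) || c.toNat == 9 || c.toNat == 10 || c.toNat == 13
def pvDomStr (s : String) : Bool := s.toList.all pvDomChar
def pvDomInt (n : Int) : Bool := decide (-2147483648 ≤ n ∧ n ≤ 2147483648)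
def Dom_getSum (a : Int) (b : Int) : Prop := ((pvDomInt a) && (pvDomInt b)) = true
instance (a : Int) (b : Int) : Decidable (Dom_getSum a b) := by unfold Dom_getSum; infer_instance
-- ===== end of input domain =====

-- B replaces A's iterative carry-propagation loop by one masked addition (closed form); same signed result.

-- ===== PORT A =====
-- the while-loop; fuel 33 only makes the recursion structural — on 32-bit-masked
-- operands the loop always exits (b = 0) before the fuel runs out (proved below)
def getSumLoop : Nat → Int → Int → Int
  | fuel, a, b =>
    if b ≠ 0 then
      match fuel with
      | 0 => a
      | f + 1 =>
        let carry := (PySem.Int.band a b) <<< (1 : Nat)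
        getSumLoop f (PySem.Int.band (PySem.Int.bxor a b) 4294967295)
                     (PySem.Int.band carry 4294967295)
    else a

def getSum (a : Int) (b : Int) : Int :=
  let MAX : Int := 4294967295
  let a' := PySem.Int.band a MAX
  let b' := PySem.Int.band b MAX
  let r := getSumLoop 33 a' b'
  if r > 2147483647 then r - ((1 : Int) <<< (32 : Nat)) else r

-- ===== PORT B =====
def getSum_alt (a : Int) (b : Int) : Int :=
  let MAX : Int := 4294967295
  let s := PySem.Int.band (PySem.Int.band a MAX + PySem.Int.band b MAX) MAX
  if s > 2147483647 then s - ((1 : Int) <<< (32 : Nat)) else s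

-- ===== PRECONDITION & SPEC =====
def Spec_getSum (a : Int) (b : Int) (out : Int) : Prop := out = getSum_alt a b
instance (a : Int) (b : Int) (out : Int) : Decidable (Spec_getSum a b out) := by unfold Spec_getSum; infer_instance

-- ===== CLAIM (what is proved, stated in full; the proofs are below) =====
def Claim_equal_getSum : Prop := ∀ (a : Int) (b : Int), Dom_getSum a b → Spec_getSum a b (getSum a b)

-- ===== LEMMAS AND PROOFS =====

-- Python's  x & 0xFFFFFFFF  is  x mod 2^32, for every integer x
theorem band_max_eq_emod (a : Int) : PySem.Int.band a 4294967295 = a % 4294967296 := by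
  unfold PySem.Int.band
  split_ifs with h h2 h2
  · have : a.toNat &&& (4294967295 : Int).toNat = a.toNat % 4294967296 := by
      have := Nat.and_two_pow_sub_one_eq_mod a.toNat 32
      norm_num at this ⊢
      exact this
    rw [this]; omega
  · omega
  · have : (4294967295 : Int).toNat &&& (-a - 1).toNat = (-a - 1).toNat % 4294967296 := by
      have := Nat.and_two_pow_sub_one_eq_mod (-a - 1).toNat 32
      rw [Nat.land_comm] at this
      norm_num at this ⊢
      exact this
    rw [this]; omega
  · omega

theorem xor_and_twice (x y : Nat) : (x ^^^ y) + 2 * (x &&& y) = x + y := by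
  induction x using Nat.binaryRec generalizing y with
  | zero => simp
  | bit c x ih =>
    induction y using Nat.binaryRec with
    | zero => simp
    | bit d y _ =>
      rw [Nat.xor_bit, Nat.land_bit]
      have := ih y
      simp only [Nat.bit_val] at *
      cases c <;> cases d <;> simp at * <;> omega

theorem two_pow_dvd_and (k x y : Nat) (h : 2 ^ k ∣ y) : 2 ^ k ∣ x &&& y := by
  apply Nat.dvd_of_mod_eq_zero
  have hy : y % 2 ^ k = 0 := Nat.mod_eq_zero_of_dvd h
  rw [← Nat.and_two_pow_sub_one_eq_mod, Nat.land_assoc, Nat.and_two_pow_sub_one_eq_mod, hy]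
  simp

theorem getSumLoop_eq (fuel : Nat) (k x y : Nat) (hx : x < 2 ^ 32) (hy : y < 2 ^ 32)
    (hdvd : 2 ^ k ∣ y) (hf : 32 ≤ k + fuel) :
    getSumLoop fuel (↑x) (↑y) = (((x + y) % 2 ^ 32 : Nat) : Int) := by
  induction fuel generalizing x y k with
  | zero =>
    have hk : 32 ≤ k := by omega
    have hy0 : y = 0 := Nat.eq_zero_of_dvd_of_lt (dvd_trans (pow_dvd_pow 2 hk) hdvd) hy
    subst hy0
    unfold getSumLoop
    simp
    omega
  | succ f ih =>
    by_cases hy0 : y = 0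
    · subst hy0
      unfold getSumLoop
      simp
      omega
    · have hkx : k < 32 := by
        by_contra hk
        exact hy0 (Nat.eq_zero_of_dvd_of_lt (dvd_trans (pow_dvd_pow 2 (by omega)) hdvd) hy)
      unfold getSumLoop
      have hyne : (↑y : Int) ≠ 0 := by exact_mod_cast hy0
      simp only [hyne, ne_eq, not_false_iff, if_pos]
      simp only [PySem.Int.band_natCast, PySem.Int.bxor_natCast]
      have hshift : ((↑(x &&& y) : Int) <<< (1 : Nat)) = (((x &&& y) * 2 : Nat) : Int) := by
        rw [Int.shiftLeft_eq]; push_cast; ring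
      rw [hshift, band_max_eq_emod, band_max_eq_emod]
      have c1 : ((x ^^^ y : Nat) : Int) % 4294967296 = (((x ^^^ y) % 2 ^ 32 : Nat) : Int) := by
        push_cast; norm_num
      have c2 : (((x &&& y) * 2 : Nat) : Int) % 4294967296 = ((((x &&& y) * 2) % 2 ^ 32 : Nat) : Int) := by
        push_cast; norm_num
      rw [c1, c2]
      have hdvd2 : 2 ^ (k + 1) ∣ (x &&& y) * 2 := by
        rw [pow_succ]
        exact mul_dvd_mul (two_pow_dvd_and k x y hdvd) (dvd_refl 2)
      have hdvd' : 2 ^ (k + 1) ∣ ((x &&& y) * 2) % 2 ^ 32 := by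
        rw [Nat.dvd_mod_iff (pow_dvd_pow 2 (by omega : k + 1 ≤ 32))]
        exact hdvd2
      rw [ih (k + 1) _ _ (Nat.mod_lt _ (by norm_num)) (Nat.mod_lt _ (by norm_num)) hdvd' (by omega)]
      congr 1
      have hid := xor_and_twice x y
      omega

theorem getSum_eq_alt (a b : Int) : getSum a b = getSum_alt a b := by
  unfold getSum getSum_alt
  have ha := band_max_eq_emod a
  have hb := band_max_eq_emod b
  have hs := band_max_eq_emod (PySem.Int.band a 4294967295 + PySem.Int.band b 4294967295)
  have ha0 : 0 ≤ PySem.Int.band a 4294967295 := by rw [ha]; omega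
  have hb0 : 0 ≤ PySem.Int.band b 4294967295 := by rw [hb]; omega
  have hax : ((PySem.Int.band a 4294967295).toNat : Int) = PySem.Int.band a 4294967295 :=
    Int.toNat_of_nonneg ha0
  have hbx : ((PySem.Int.band b 4294967295).toNat : Int) = PySem.Int.band b 4294967295 :=
    Int.toNat_of_nonneg hb0
  have haz : (PySem.Int.band a 4294967295).toNat < 2 ^ 32 := by omega
  have hbz : (PySem.Int.band b 4294967295).toNat < 2 ^ 32 := by omega
  have hloop := getSumLoop_eq 33 0 (PySem.Int.band a 4294967295).toNat
    (PySem.Int.band b 4294967295).toNat haz hbz (one_dvd _) (by omega)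
  rw [hax, hbx] at hloop
  simp only [hloop, hs]
  have : (((PySem.Int.band a 4294967295).toNat + (PySem.Int.band b 4294967295).toNat) % 2 ^ 32 : Nat)
      = ((PySem.Int.band a 4294967295 + PySem.Int.band b 4294967295) % 4294967296).toNat := by
    omega
  rw [this]
  omega

-- ===== VERDICT (by name: the statement is the Claim_ definition above) =====
theorem getSum_spec : Claim_equal_getSum := by
  intro a b _
  unfold Spec_getSum
  exact getSum_eq_alt a b
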